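-- pv_equiv track=rewrite | github.com/ernestvmo/AdventOfCode | 2017/day_09/AoC.py | treat
-- ===== SOURCE A (Python) =====
-- def treat(data: str):
--     opened_group = []
--     group_count = 0
--     garbage_mode = False
--     garbage_count = 0
--     for i in range(len(data)):
--         if garbage_mode:
--             if data[i] == ">":
--                 garbage_mode = False
--             else:
--                 garbage_count += 1
--         if not garbage_mode:
--             if data[i] == "<":
--                 garbage_mode = True
--             if data[i] == "{":
--                 opened_group.append(i)
--             if data[i] == "}":
--                 opened_group.pop()
--                 group_count += 1 + len(opened_group)
--     return group_count, garbage_count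
-- ===== SOURCE B (Python) =====
-- def treat(data: str):
--     # Pass 1: garbage state machine only; collect braces seen outside garbage.
--     garbage = False
--     garbage_count = 0
--     cleaned = []
--     for ch in data:
--         if garbage:
--             if ch == ">":
--                 garbage = False
--             else:
--                 garbage_count += 1
--         elif ch == "<":
--             garbage = True
--         elif ch in "{}":
--             cleaned.append(ch)
--     # Pass 2: score the cleaned brace string with a stack.
--     group_count = 0
--     stack = []
--     for ch in cleaned:
--         if ch == "{":
--             stack.append(ch)
--         else:
--             stack.pop()
--             group_count += 1 + len(stack)
--     return group_count, garbage_count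
-- ===== Notes on version B (the rewrite author's own statement) =====
-- stated objective: alternative
-- what changed: Splits A's single interleaved loop into two passes: pass 1 runs only the garbage state machine and emits the braces seen outside garbage, pass 2 scores that cleaned brace list with a stack.
import Mathlib
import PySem

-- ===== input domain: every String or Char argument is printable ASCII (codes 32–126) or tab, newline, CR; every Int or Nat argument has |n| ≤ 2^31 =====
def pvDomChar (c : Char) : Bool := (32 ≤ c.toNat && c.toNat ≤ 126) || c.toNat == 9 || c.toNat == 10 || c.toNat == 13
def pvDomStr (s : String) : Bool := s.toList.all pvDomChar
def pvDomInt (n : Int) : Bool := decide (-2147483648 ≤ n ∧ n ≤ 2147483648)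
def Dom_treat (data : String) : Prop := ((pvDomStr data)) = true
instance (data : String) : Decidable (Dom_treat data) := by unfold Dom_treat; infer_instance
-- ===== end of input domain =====

-- B replaces A's single interleaved loop by two passes (garbage stripping, then
-- stack scoring of the cleaned braces); alternative decomposition, same cost.

-- ===== PORT A =====
-- state: (opened_group (none = pop() raised IndexError), group_count, garbage_mode, garbage_count)
def pvStepA (s : Option (List Int) × Int × Bool × Int) (ic : Int × Char) :
    Option (List Int) × Int × Bool × Int :=
  match s with
  | (none, g, m, gc) => (none, g, m, gc)
  | (some st, g, m, gc) =>
    let m1 := if m then (if ic.2 = '>' then false else m) else m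
    let gc1 := if m then (if ic.2 = '>' then gc else gc + 1) else gc
    if m1 then (some st, g, m1, gc1)
    else
      let m2 := if ic.2 = '<' then true else m1
      if ic.2 = '{' then (some (st ++ [ic.1]), g, m2, gc1)
      else if ic.2 = '}' then
        match PySem.List.pop? st (-1) with
        | none => (none, g, m2, gc1)                  -- Python: IndexError (excluded by Pre_)
        | some r => (some r.2, g + 1 + (r.2.length : Int), m2, gc1)
      else (some st, g, m2, gc1)

def treat (data : String) : Int × Int :=
  let r := (PySem.List.enumerate data.toList 0).foldl pvStepA (some [], 0, false, 0)
  (r.2.1, r.2.2.2)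

-- ===== PORT B =====
-- pass 1 state: (garbage, garbage_count, cleaned)
def pvStepB1 (s : Bool × Int × List Char) (c : Char) : Bool × Int × List Char :=
  match s with
  | (garbage, gc, cl) =>
    if garbage then (if c = '>' then (false, gc, cl) else (true, gc + 1, cl))
    else if c = '<' then (true, gc, cl)
    else if c = '{' ∨ c = '}' then (garbage, gc, cl ++ [c])  -- ch in "{}"
    else (garbage, gc, cl)

-- pass 2 state: (stack (none = pop() raised IndexError), group_count)
def pvStepB2 (s : Option (List Char) × Int) (c : Char) : Option (List Char) × Int :=
  match s with
  | (none, g) => (none, g)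
  | (some st, g) =>
    if c = '{' then (some (st ++ [c]), g)
    else
      match PySem.List.pop? st (-1) with
      | none => (none, g)                             -- Python: IndexError (excluded by Pre_)
      | some r => (some r.2, g + 1 + (r.2.length : Int))

def treat_alt (data : String) : Int × Int :=
  let p1 := data.toList.foldl pvStepB1 (false, 0, [])
  let p2 := p1.2.2.foldl pvStepB2 (some [], 0)
  (p2.2, p1.2.1)

-- ===== PRECONDITION & SPEC =====
-- the braces of l lying outside garbage (starting in garbage mode m)
def pvStrip (m : Bool) (l : List Char) : List Char :=
  match l with
  | [] => []
  | c :: cs =>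
    if m then (if c = '>' then pvStrip false cs else pvStrip true cs)
    else if c = '<' then pvStrip true cs
    else if c = '{' then c :: pvStrip false cs
    else if c = '}' then c :: pvStrip false cs
    else pvStrip false cs

-- Pre_ excludes exactly the inputs on which both programs raise IndexError:
-- strings whose braces outside garbage have some prefix with more '}' than '{'.
def Pre_treat (data : String) : Prop :=
  ∀ p ∈ (pvStrip false data.toList).inits, p.count '}' ≤ p.count '{'
instance (data : String) : Decidable (Pre_treat data) := by unfold Pre_treat; infer_instance

def pvWitness_treat : String := "{{<a!>},{}}"

def Spec_treat (data : String) (out : Int × Int) : Prop := out = treat_alt data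
instance (data : String) (out : Int × Int) : Decidable (Spec_treat data out) := by unfold Spec_treat; infer_instance

-- ===== CLAIM (what is proved, stated in full; the proofs are below) =====
def Claim_equal_treat : Prop := ∀ (data : String), Dom_treat data → Pre_treat data → Spec_treat data (treat data)

-- ===== LEMMAS AND PROOFS =====

-- garbage characters counted when scanning l starting in garbage mode m
def pvGarb (m : Bool) (l : List Char) : Int :=
  match l with
  | [] => 0
  | c :: cs =>
    if m then (if c = '>' then pvGarb false cs else 1 + pvGarb true cs)
    else if c = '<' then pvGarb true cs
    else pvGarb false cs

-- "no stack underflow when scoring l from depth d" (l consists of braces only)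
def pvOk (d : Nat) (l : List Char) : Bool :=
  match l with
  | [] => true
  | c :: cs => if c = '{' then pvOk (d + 1) cs else (match d with | 0 => false | Nat.succ d' => pvOk d' cs)

lemma pvStrip_braces (m : Bool) (l : List Char) : ∀ c ∈ pvStrip m l, c = '{' ∨ c = '}' := by
  induction l generalizing m with
  | nil => simp [pvStrip]
  | cons c cs ih =>
    intro x hx
    unfold pvStrip at hx
    split_ifs at hx with h1 h2 h3 h4 h5
    · exact ih _ x hx
    · exact ih _ x hx
    · exact ih _ x hx
    · rw [List.mem_cons] at hx
      rcases hx with rfl | hx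
      · exact Or.inl h4
      · exact ih _ x hx
    · rw [List.mem_cons] at hx
      rcases hx with rfl | hx
      · exact Or.inr h5
      · exact ih _ x hx
    · exact ih _ x hx

lemma pvOk_of_counts (l : List Char) (d : Nat)
    (hb : ∀ c ∈ l, c = '{' ∨ c = '}')
    (h : ∀ p, p <+: l → p.count '}' ≤ p.count '{' + d) : pvOk d l = true := by
  induction l generalizing d with
  | nil => simp [pvOk]
  | cons c cs ih =>
    unfold pvOk
    rcases hb c (by simp) with rfl | rfl
    · rw [if_pos rfl]
      refine ih (d + 1) (fun x hx => hb x (by simp [hx])) ?_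
      intro p hp
      have := h ('{' :: p) (List.cons_prefix_cons.mpr ⟨rfl, hp⟩)
      simp at this ⊢
      omega
    · have hne : ('}' : Char) ≠ '{' := by decide
      simp only [if_neg hne]
      have h1 := h ['}'] ⟨cs, rfl⟩
      simp at h1
      cases d with
      | zero => omega
      | succ d' =>
        refine ih d' (fun x hx => hb x (by simp [hx])) ?_
        intro p hp
        have := h ('}' :: p) (List.cons_prefix_cons.mpr ⟨rfl, hp⟩)
        simp at this ⊢
        omega

-- pass 1 of B computes the garbage count and the stripped braces
lemma pvB1_spec (l : List Char) : ∀ (m : Bool) (gc : Int) (cl : List Char),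
    ∃ m', l.foldl pvStepB1 (m, gc, cl) = (m', gc + pvGarb m l, cl ++ pvStrip m l) := by
  induction l with
  | nil => intro m gc cl; exact ⟨m, by simp [pvGarb, pvStrip]⟩
  | cons c cs ih =>
    intro m gc cl
    by_cases hm : m
    · subst hm
      by_cases hgt : c = '>'
      · subst hgt
        obtain ⟨m', h⟩ := ih false gc cl
        exact ⟨m', by rw [List.foldl_cons, show pvStepB1 (true, gc, cl) '>' = (false, gc, cl) from rfl,
          h, show pvGarb true ('>' :: cs) = pvGarb false cs from rfl,
          show pvStrip true ('>' :: cs) = pvStrip false cs from rfl]⟩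
      · obtain ⟨m', h⟩ := ih true (gc + 1) cl
        refine ⟨m', ?_⟩
        rw [List.foldl_cons, show pvStepB1 (true, gc, cl) c = (true, gc + 1, cl) by
            simp [pvStepB1, hgt], h,
          show pvGarb true (c :: cs) = 1 + pvGarb true cs by simp [pvGarb, hgt],
          show pvStrip true (c :: cs) = pvStrip true cs by simp [pvStrip, hgt],
          show gc + (1 + pvGarb true cs) = gc + 1 + pvGarb true cs by ring]
    · simp only [Bool.not_eq_true] at hm; subst hm
      by_cases hlt : c = '<'
      · subst hlt
        obtain ⟨m', h⟩ := ih true gc cl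
        exact ⟨m', by rw [List.foldl_cons, show pvStepB1 (false, gc, cl) '<' = (true, gc, cl) from rfl,
          h, show pvGarb false ('<' :: cs) = pvGarb true cs from rfl,
          show pvStrip false ('<' :: cs) = pvStrip true cs from rfl]⟩
      · by_cases ho : c = '{'
        · subst ho
          obtain ⟨m', h⟩ := ih false gc (cl ++ ['{'])
          refine ⟨m', ?_⟩
          rw [List.foldl_cons, show pvStepB1 (false, gc, cl) '{' = (false, gc, cl ++ ['{']) from rfl,
            h, show pvGarb false ('{' :: cs) = pvGarb false cs from rfl,
            show pvStrip false ('{' :: cs) = '{' :: pvStrip false cs from rfl,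
            List.append_assoc, List.singleton_append]
        · by_cases hc : c = '}'
          · subst hc
            obtain ⟨m', h⟩ := ih false gc (cl ++ ['}'])
            refine ⟨m', ?_⟩
            rw [List.foldl_cons, show pvStepB1 (false, gc, cl) '}' = (false, gc, cl ++ ['}']) from rfl,
              h, show pvGarb false ('}' :: cs) = pvGarb false cs from rfl,
              show pvStrip false ('}' :: cs) = '}' :: pvStrip false cs from rfl,
              List.append_assoc, List.singleton_append]
          · obtain ⟨m', h⟩ := ih false gc cl
            refine ⟨m', ?_⟩
            rw [List.foldl_cons, show pvStepB1 (false, gc, cl) c = (false, gc, cl) by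
                simp [pvStepB1, hlt, ho, hc], h,
              show pvGarb false (c :: cs) = pvGarb false cs by simp [pvGarb, hlt],
              show pvStrip false (c :: cs) = pvStrip false cs by simp [pvStrip, hlt, ho, hc]]

-- main invariant: A's interleaved loop = garbage machine + stack scoring of the stripped braces
lemma pvMain (l : List (Int × Char)) : ∀ (m : Bool) (g gc : Int) (st : List Int) (stB : List Char),
    st.length = stB.length →
    pvOk stB.length (pvStrip m (l.map (·.2))) = true →
    ∃ st' m', l.foldl pvStepA (some st, g, m, gc)
      = (some st', ((pvStrip m (l.map (·.2))).foldl pvStepB2 (some stB, g)).2, m',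
         gc + pvGarb m (l.map (·.2))) := by
  induction l with
  | nil => intro m g gc st stB _ _; exact ⟨st, m, by simp [pvGarb, pvStrip]⟩
  | cons ic l ih =>
    intro m g gc st stB hlen hok
    obtain ⟨i, c⟩ := ic
    rw [List.map_cons] at hok ⊢
    by_cases hm : m
    · subst hm
      by_cases hgt : c = '>'
      · subst hgt
        rw [show pvStrip true ('>' :: l.map (·.2)) = pvStrip false (l.map (·.2)) from rfl] at hok ⊢
        rw [show pvGarb true ('>' :: l.map (·.2)) = pvGarb false (l.map (·.2)) from rfl,
          List.foldl_cons, show pvStepA (some st, g, true, gc) (i, '>') = (some st, g, false, gc) from rfl]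
        exact ih false g gc st stB hlen hok
      · rw [show pvStrip true (c :: l.map (·.2)) = pvStrip true (l.map (·.2)) by
            simp [pvStrip, hgt]] at hok ⊢
        obtain ⟨st', m', h⟩ := ih true g (gc + 1) st stB hlen hok
        refine ⟨st', m', ?_⟩
        rw [List.foldl_cons, show pvStepA (some st, g, true, gc) (i, c) = (some st, g, true, gc + 1) by
            simp [pvStepA, hgt], h,
          show pvGarb true (c :: l.map (·.2)) = 1 + pvGarb true (l.map (·.2)) by simp [pvGarb, hgt],
          show gc + (1 + pvGarb true (l.map (·.2))) = gc + 1 + pvGarb true (l.map (·.2)) by ring]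
    · simp only [Bool.not_eq_true] at hm; subst hm
      by_cases hlt : c = '<'
      · subst hlt
        rw [show pvStrip false ('<' :: l.map (·.2)) = pvStrip true (l.map (·.2)) from rfl] at hok ⊢
        rw [show pvGarb false ('<' :: l.map (·.2)) = pvGarb true (l.map (·.2)) from rfl,
          List.foldl_cons, show pvStepA (some st, g, false, gc) (i, '<') = (some st, g, true, gc) from rfl]
        exact ih true g gc st stB hlen hok
      · by_cases ho : c = '{'
        · subst ho
          rw [show pvStrip false ('{' :: l.map (·.2)) = '{' :: pvStrip false (l.map (·.2)) from rfl]
            at hok ⊢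
          have hok' : pvOk (stB ++ ['{']).length (pvStrip false (l.map (·.2))) = true := by
            have : pvOk stB.length ('{' :: pvStrip false (l.map (·.2)))
                = pvOk (stB.length + 1) (pvStrip false (l.map (·.2))) := rfl
            rw [this] at hok
            simpa [List.length_append] using hok
          obtain ⟨st', m', h⟩ := ih false g gc (st ++ [i]) (stB ++ ['{'])
            (by simp [hlen]) hok'
          refine ⟨st', m', ?_⟩
          rw [List.foldl_cons,
            show pvStepA (some st, g, false, gc) (i, '{') = (some (st ++ [i]), g, false, gc) from rfl,
            h, List.foldl_cons,
            show pvStepB2 (some stB, g) '{' = (some (stB ++ ['{']), g) from rfl,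
            show pvGarb false ('{' :: l.map (·.2)) = pvGarb false (l.map (·.2)) from rfl]
        · by_cases hc : c = '}'
          · subst hc
            rw [show pvStrip false ('}' :: l.map (·.2)) = '}' :: pvStrip false (l.map (·.2)) from rfl]
              at hok ⊢
            cases hsl : stB.length with
            | zero =>
              rw [hsl] at hok
              have : pvOk 0 ('}' :: pvStrip false (l.map (·.2))) = false := rfl
              rw [this] at hok
              exact absurd hok (by simp)
            | succ d' =>
              rw [hsl] at hok
              have hok' : pvOk d' (pvStrip false (l.map (·.2))) = true := hok
              have hstBne : stB ≠ [] := by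
                intro hnil; rw [hnil] at hsl; simp at hsl
              have hstne : st ≠ [] := by
                intro hnil; rw [hnil] at hlen
                exact hstBne (List.eq_nil_of_length_eq_zero hlen.symm)
              have hdB : stB.dropLast.length = d' := by
                simp [List.length_dropLast, hsl]
              have hdA : st.dropLast.length = stB.dropLast.length := by
                rw [List.length_dropLast, List.length_dropLast, hlen]
              have hpopA : PySem.List.pop? st (-1) = some (st.getLast hstne, st.dropLast) := by
                conv_lhs => rw [← List.dropLast_concat_getLast hstne]
                exact PySem.List.pop?_last _ _
              have hpopB : PySem.List.pop? stB (-1) = some (stB.getLast hstBne, stB.dropLast) := by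
                conv_lhs => rw [← List.dropLast_concat_getLast hstBne]
                exact PySem.List.pop?_last _ _
              obtain ⟨st', m', h⟩ := ih false (g + 1 + (st.dropLast.length : Int)) gc
                st.dropLast stB.dropLast hdA (by rw [hdB]; exact hok')
              refine ⟨st', m', ?_⟩
              rw [List.foldl_cons,
                show pvStepA (some st, g, false, gc) (i, '}')
                    = (some st.dropLast, g + 1 + (st.dropLast.length : Int), false, gc) by
                  simp [pvStepA, hpopA],
                h, List.foldl_cons,
                show pvStepB2 (some stB, g) '}'
                    = (some stB.dropLast, g + 1 + (stB.dropLast.length : Int)) by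
                  simp [pvStepB2, hpopB],
                show pvGarb false ('}' :: l.map (·.2)) = pvGarb false (l.map (·.2)) from rfl, hdA]
          · rw [show pvStrip false (c :: l.map (·.2)) = pvStrip false (l.map (·.2)) by
                simp [pvStrip, hlt, ho, hc]] at hok ⊢
            obtain ⟨st', m', h⟩ := ih false g gc st stB hlen hok
            refine ⟨st', m', ?_⟩
            rw [List.foldl_cons, show pvStepA (some st, g, false, gc) (i, c) = (some st, g, false, gc) by
                simp [pvStepA, hlt, ho, hc], h,
              show pvGarb false (c :: l.map (·.2)) = pvGarb false (l.map (·.2)) by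
                simp [pvGarb, hlt]]

-- ===== VERDICT (by name: the statement is the Claim_ definition above) =====
theorem treat_spec : Claim_equal_treat := by
  intro data _ hpre
  unfold Spec_treat treat treat_alt
  have hok : pvOk 0 (pvStrip false data.toList) = true := by
    refine pvOk_of_counts _ 0 (pvStrip_braces _ _) (fun p hp => ?_)
    have := hpre p ((List.mem_inits p _).mpr hp)
    omega
  obtain ⟨st', m2, hA⟩ := pvMain (PySem.List.enumerate data.toList 0) false 0 0 [] []
    rfl (by rw [PySem.List.map_snd_enumerate]; exact hok)
  obtain ⟨m', hB1⟩ := pvB1_spec data.toList false 0 []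
  rw [PySem.List.map_snd_enumerate] at hA
  simp only [hA, hB1]
  simp
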